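-- pv_equiv track=rewrite | github.com/gulfamsuleman/AI | backend/chatbot/chatbot/services/status_report_connection_service.py | parse_user_selection
-- ===== SOURCE A (Python) =====
-- from typing import Dict, Any, List, Optional, Tuple
--
-- def parse_user_selection(user_input: str, options: List[Dict[str, Any]], key_field: str = 'name') -> Optional[Dict[str, Any]]:
--     """
--     Parse user selection from a list of options.
--
--     Args:
--         user_input: User's input (number, name, or partial name)
--         options: List of option dictionaries
--         key_field: Field to use for name matching (default: 'name')
--
--     Returns:
--         Selected option dictionary or None if not found
--     """
--     user_input = user_input.strip()
--
--     # Check if input is a number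
--     try:
--         selection_num = int(user_input)
--         if 1 <= selection_num <= len(options):
--             return options[selection_num - 1]
--     except ValueError:
--         pass
--
--     # Check for exact match
--     for option in options:
--         if option[key_field].lower() == user_input.lower():
--             return option
--
--     # Check for partial match
--     for option in options:
--         if user_input.lower() in option[key_field].lower():
--             return option
--
--     return None
-- ===== SOURCE B (Python) =====
-- def parse_user_selection(user_input, options, key_field='name'):
--     user_input = user_input.strip()
--
--     # Numeric selection (same as A)
--     try:
--         selection_num = int(user_input)
--         if 1 <= selection_num <= len(options):
--             return options[selection_num - 1]
--     except ValueError: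
--         pass
--
--     # One traversal: return the first exact match immediately, remember the
--     # first partial match as a fallback.
--     target = user_input.lower()
--     partial = None
--     for option in options:
--         name = option[key_field].lower()
--         if name == target:
--             return option
--         if partial is None and target in name:
--             partial = option
--     return partial
-- ===== Notes on version B (the rewrite author's own statement) =====
-- stated objective: alternative
-- what changed: The two sequential scans (exact then partial) are fused into a single traversal that returns the first exact match immediately and keeps the first partial match as a fallback, lowercasing the input once.
import Mathlib
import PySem

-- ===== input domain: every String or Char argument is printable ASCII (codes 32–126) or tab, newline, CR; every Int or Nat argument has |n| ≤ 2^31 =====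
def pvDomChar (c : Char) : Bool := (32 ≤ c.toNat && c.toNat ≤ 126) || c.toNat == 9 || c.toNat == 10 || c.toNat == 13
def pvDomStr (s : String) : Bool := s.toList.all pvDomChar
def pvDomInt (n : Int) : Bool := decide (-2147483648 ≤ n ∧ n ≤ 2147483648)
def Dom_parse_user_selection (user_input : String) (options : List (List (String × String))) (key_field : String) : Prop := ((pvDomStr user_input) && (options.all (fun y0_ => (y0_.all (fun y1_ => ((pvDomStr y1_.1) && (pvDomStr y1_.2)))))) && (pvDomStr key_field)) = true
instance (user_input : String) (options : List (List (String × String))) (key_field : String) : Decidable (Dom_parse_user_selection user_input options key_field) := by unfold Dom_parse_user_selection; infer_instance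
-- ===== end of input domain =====

-- B fuses A's two sequential scans (exact, then partial) into one traversal that
-- returns the first exact match immediately and keeps the first partial match as
-- a fallback (objective: alternative decomposition, same cost).


-- ===== PORT A =====
-- option[key_field]: dict lookup on the association list (first match).
def pvGetKey (o : List (String × String)) (k : String) : Option String :=
  (PySem.Dict.mk o).get? k

-- 'for option in options: if option[key_field].lower() == user_input.lower(): return option'
-- (a missing key is KeyError in Python; the port returns none there — excluded by Pre_).
def pvFindExact (ui : String) (key : String) : List (List (String × String)) → Option (List (String × String))
  | [] => none
  | o :: rest =>
    match pvGetKey o key with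
    | none => none
    | some v =>
      if PySem.Str.lower v = PySem.Str.lower ui then some o else pvFindExact ui key rest

-- 'for option in options: if user_input.lower() in option[key_field].lower(): return option'
def pvFindPartial (ui : String) (key : String) : List (List (String × String)) → Option (List (String × String))
  | [] => none
  | o :: rest =>
    match pvGetKey o key with
    | none => none
    | some v =>
      if PySem.Str.isIn (PySem.Str.lower ui) (PySem.Str.lower v) then some o
      else pvFindPartial ui key rest

def parse_user_selection (user_input : String) (options : List (List (String × String))) (key_field : String) : Option (List (String × String)) :=
  let s := PySem.Str.strip user_input
  match PySem.Int.ofStr? s with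
  | some n =>
    if 1 ≤ n ∧ n ≤ (options.length : Int) then PySem.List.pyGet? options (n - 1)
    else
      match pvFindExact s key_field options with
      | some o => some o
      | none => pvFindPartial s key_field options
  | none =>
    match pvFindExact s key_field options with
    | some o => some o
    | none => pvFindPartial s key_field options

-- ===== PORT B =====
-- B's single loop: first exact match returns at once; 'partial' keeps the first
-- partial match (missing key is KeyError in Python; the port yields the current
-- fallback there — excluded by Pre_).
def pvScan (target : String) (key : String) : List (List (String × String)) → Option (List (String × String)) → Option (List (String × String))
  | [], part => part
  | o :: rest, part =>
    match pvGetKey o key with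
    | none => part
    | some v =>
      let name := PySem.Str.lower v
      if name = target then some o
      else pvScan target key rest (if part.isNone && PySem.Str.isIn target name then some o else part)

def parse_user_selection_alt (user_input : String) (options : List (List (String × String))) (key_field : String) : Option (List (String × String)) :=
  let s := PySem.Str.strip user_input
  match PySem.Int.ofStr? s with
  | some n =>
    if 1 ≤ n ∧ n ≤ (options.length : Int) then PySem.List.pyGet? options (n - 1)
    else pvScan (PySem.Str.lower s) key_field options none
  | none => pvScan (PySem.Str.lower s) key_field options none

-- ===== PRECONDITION & SPEC =====
def pvNumHit (user_input : String) (len : Nat) : Bool :=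
  match PySem.Int.ofStr? (PySem.Str.strip user_input) with
  | some n => decide (1 ≤ n ∧ n ≤ (len : Int))
  | none => false

-- s here is the already-stripped user input
def pvExactHit (s : String) (key : String) (o : List (String × String)) : Bool :=
  match pvGetKey o key with
  | some v => PySem.Str.lower v == PySem.Str.lower s
  | none => false

def pvHasKey (key : String) (o : List (String × String)) : Bool :=
  (pvGetKey o key).isSome

-- Pre_ holds exactly where A returns: the numeric branch returns, or every option
-- carries key_field, or an exact name match occurs and every option before it
-- carries key_field; everywhere else A raises KeyError (as does B).
def Pre_parse_user_selection (user_input : String) (options : List (List (String × String))) (key_field : String) : Prop :=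
  pvNumHit user_input options.length = true ∨
  (∀ o ∈ options, pvHasKey key_field o = true) ∨
  (∃ j : Fin options.length, pvExactHit (PySem.Str.strip user_input) key_field options[j] = true ∧
     ∀ i : Fin options.length, i.val < j.val → pvHasKey key_field options[i] = true)
instance (user_input : String) (options : List (List (String × String))) (key_field : String) : Decidable (Pre_parse_user_selection user_input options key_field) := by unfold Pre_parse_user_selection; infer_instance

def pvWitness_parse_user_selection : String × (List (List (String × String))) × String :=
  ("al", [[("name", "Beta")], [("name", "Alpha")]], "name")

def Spec_parse_user_selection (user_input : String) (options : List (List (String × String))) (key_field : String) (out : Option (List (String × String))) : Prop := out = parse_user_selection_alt user_input options key_field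
instance (user_input : String) (options : List (List (String × String))) (key_field : String) (out : Option (List (String × String))) : Decidable (Spec_parse_user_selection user_input options key_field out) := by unfold Spec_parse_user_selection; infer_instance

-- ===== CLAIM (what is proved, stated in full; the proofs are below) =====
def Claim_equal_parse_user_selection : Prop := ∀ (user_input : String) (options : List (List (String × String))) (key_field : String), Dom_parse_user_selection user_input options key_field → Pre_parse_user_selection user_input options key_field → Spec_parse_user_selection user_input options key_field (parse_user_selection user_input options key_field)

-- ===== LEMMAS AND PROOFS =====

-- When an exact match occurs and every earlier option carries the key, the exact
-- scan finds one, and the fused loop returns the same option whatever its fallback is.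
theorem pvScan_prefix (s key : String) :
    ∀ (opts : List (List (String × String))) (j : Nat), (hj : j < opts.length) →
      pvExactHit s key opts[j] = true →
      (∀ i, (hi : i < opts.length) → i < j → pvHasKey key opts[i] = true) →
      ∃ o, pvFindExact s key opts = some o ∧
        ∀ part, pvScan (PySem.Str.lower s) key opts part = some o := by
  intro opts
  induction opts with
  | nil => intro j hj; simp at hj
  | cons o rest ih =>
    intro j hj hex hpre
    cases hk : pvGetKey o key with
    | none =>
      exfalso
      cases j with
      | zero => simp [pvExactHit, hk] at hex
      | succ j' =>
        have := hpre 0 (by simp) (by omega)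
        simp [pvHasKey, hk] at this
    | some v =>
      by_cases he : PySem.Str.lower v = PySem.Str.lower s
      · exact ⟨o, by simp [pvFindExact, hk, he], fun part => by simp [pvScan, hk, he]⟩
      · cases j with
        | zero => simp [pvExactHit, hk, he] at hex
        | succ j' =>
          obtain ⟨o', ho', hscan⟩ := ih j' (by simpa using hj)
            (by simpa using hex)
            (fun i hi hij => by
              have := hpre (i + 1) (by simpa using hi) (by omega)
              simpa using this)
          refine ⟨o', by simp [pvFindExact, hk, he, ho'], fun part => ?_⟩
          simp [pvScan, hk, he, hscan]

-- The fused loop equals: first exact match, else the fallback, else first partial match.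
theorem pvScan_eq (ui key : String) (opts : List (List (String × String)))
    (h : ∀ o ∈ opts, (pvGetKey o key).isSome = true) (part : Option (List (String × String))) :
    pvScan (PySem.Str.lower ui) key opts part =
      match pvFindExact ui key opts with
      | some o => some o
      | none =>
        match part with
        | some p => some p
        | none => pvFindPartial ui key opts := by
  induction opts generalizing part with
  | nil => cases part <;> simp [pvScan, pvFindExact, pvFindPartial]
  | cons o rest ih =>
    obtain ⟨v, hv⟩ : ∃ v, pvGetKey o key = some v := by
      have := h o (by simp)
      cases hg : pvGetKey o key with
      | none => rw [hg] at this; simp at this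
      | some v => exact ⟨v, rfl⟩
    have hrest : ∀ o' ∈ rest, (pvGetKey o' key).isSome = true :=
      fun o' ho' => h o' (by simp [ho'])
    by_cases he : PySem.Str.lower v = PySem.Str.lower ui
    · simp [pvScan, pvFindExact, hv, he]
    · rw [pvScan, pvFindExact, hv]
      simp only [he, if_false]
      rw [ih hrest]
      cases part with
      | some p => rfl
      | none =>
        cases hfe : pvFindExact ui key rest <;>
          by_cases hp : PySem.Chars.isIn (PySem.Chars.lower ui.toList) (PySem.Chars.lower v.toList) = true <;>
            simp [pvFindPartial, hv, hfe, hp]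

-- The non-numeric fall-through: under either remaining disjunct of Pre_, A's two
-- scans equal B's fused loop.
theorem pvTail_eq (s key : String) (opts : List (List (String × String)))
    (h : (∀ o ∈ opts, pvHasKey key o = true) ∨
      (∃ j : Fin opts.length, pvExactHit s key opts[j] = true ∧
        ∀ i : Fin opts.length, i.val < j.val → pvHasKey key opts[i] = true)) :
    (match pvFindExact s key opts with
     | some o => some o
     | none => pvFindPartial s key opts) = pvScan (PySem.Str.lower s) key opts none := by
  rcases h with hall | ⟨j, hex, hpre⟩
  · rw [pvScan_eq s key opts (fun o ho => hall o ho) none]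
  · obtain ⟨o, ho, hscan⟩ :=
      pvScan_prefix s key opts j.val j.isLt hex (fun i hi hij => hpre ⟨i, hi⟩ hij)
    rw [ho, hscan]

-- ===== VERDICT (by name: the statement is the Claim_ definition above) =====
theorem parse_user_selection_spec : Claim_equal_parse_user_selection := by
  intro ui opts key _ hpre
  unfold Spec_parse_user_selection parse_user_selection parse_user_selection_alt
  cases hofs : PySem.Int.ofStr? (PySem.Str.strip ui) with
  | some n =>
    by_cases hr : 1 ≤ n ∧ n ≤ (opts.length : Int)
    · simp [hofs, hr]
    · have h : (∀ o ∈ opts, pvHasKey key o = true) ∨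
          (∃ j : Fin opts.length, pvExactHit (PySem.Str.strip ui) key opts[j] = true ∧
            ∀ i : Fin opts.length, i.val < j.val → pvHasKey key opts[i] = true) := by
        rcases hpre with hnum | h
        · exfalso
          rw [pvNumHit, hofs] at hnum
          simp at hnum
          exact hr hnum
        · exact h
      simp only [hofs, hr, if_false]
      exact pvTail_eq (PySem.Str.strip ui) key opts h
  | none =>
    have h : (∀ o ∈ opts, pvHasKey key o = true) ∨
        (∃ j : Fin opts.length, pvExactHit (PySem.Str.strip ui) key opts[j] = true ∧
          ∀ i : Fin opts.length, i.val < j.val → pvHasKey key opts[i] = true) := by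
      rcases hpre with hnum | h
      · exfalso; rw [pvNumHit, hofs] at hnum; simp at hnum
      · exact h
    simp only [hofs]
    exact pvTail_eq (PySem.Str.strip ui) key opts h
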